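-- pv_equiv track=rewrite | github.com/adaros92/pygme | pygme/utils/space.py | get_contiguous_coordinates
-- ===== SOURCE A (Python) =====
-- def get_contiguous_coordinates(starting_coordinate: tuple, direction: str, size: int) -> list:
--     """ Provides a list of contiguous coordinate tuples from the starting coordinate in the given direction
--     Contiguous coordinates are those in a sequence without skipping in either the X or Y direction
--
--     Example: (1,0), (2,0), (3,0) are contiguous
--     (1,0), (2,1), (4,0) are not
--
--     :param starting_coordinate - an (x-coordinate, y-coordinate) tuple of the starting square
--     :param direction - one of four directions (right, down, left, up) to generate the sequence in
--     :param size - the size of the sequence in number of squares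
--     :returns a list of coordinate tuples in a contiguous sequence
--     """
--     assert direction in {"right", "down", "left", "up"}
--     coordinate_list = [starting_coordinate]
--     for idx in range(size - 1):
--         if direction == "right":
--             new_coordinate = (coordinate_list[idx][0] + 1, coordinate_list[idx][1])
--         elif direction == "down":
--             new_coordinate = (coordinate_list[idx][0], coordinate_list[idx][1] + 1)
--         elif direction == "left":
--             new_coordinate = (coordinate_list[idx][0] - 1, coordinate_list[idx][1])
--         else:
--             new_coordinate = (coordinate_list[idx][0], coordinate_list[idx][1] - 1)
--         coordinate_list.append(new_coordinate)
--     return coordinate_list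
-- ===== SOURCE B (Python) =====
-- def get_contiguous_coordinates(starting_coordinate: tuple, direction: str, size: int) -> list:
--     """Closed-form re-implementation: each coordinate computed directly from the
--     starting coordinate and its index via a fixed per-direction step."""
--     assert direction in {"right", "down", "left", "up"}
--     dx, dy = {"right": (1, 0), "down": (0, 1), "left": (-1, 0), "up": (0, -1)}[direction]
--     x0, y0 = starting_coordinate
--     return [(x0 + i * dx, y0 + i * dy) for i in range(max(1, size))]
-- ===== Notes on version B (the rewrite author's own statement) =====
-- stated objective: idiomatic
-- what changed: Replaces the element-by-element loop (each coordinate derived from the previously appended one, with the direction re-tested in every iteration) by a direction-to-(dx,dy) table lookup and a closed-form comprehension computing element i directly as start + i*step.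
import Mathlib
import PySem

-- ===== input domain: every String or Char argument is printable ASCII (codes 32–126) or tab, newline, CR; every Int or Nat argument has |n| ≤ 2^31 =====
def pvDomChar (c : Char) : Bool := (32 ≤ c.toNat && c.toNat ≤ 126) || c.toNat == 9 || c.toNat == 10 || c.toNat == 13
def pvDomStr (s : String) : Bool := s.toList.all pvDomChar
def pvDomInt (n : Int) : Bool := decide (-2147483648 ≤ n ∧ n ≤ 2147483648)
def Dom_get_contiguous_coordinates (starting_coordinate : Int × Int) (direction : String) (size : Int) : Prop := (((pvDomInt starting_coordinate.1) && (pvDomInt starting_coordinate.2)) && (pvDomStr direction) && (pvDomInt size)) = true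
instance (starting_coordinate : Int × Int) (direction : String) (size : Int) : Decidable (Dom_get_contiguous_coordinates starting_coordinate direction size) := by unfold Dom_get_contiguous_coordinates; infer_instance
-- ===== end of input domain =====

-- B replaces A's element-by-element loop (each coordinate built from the previous one,
-- re-testing the direction each iteration) by a direction→(dx,dy) lookup and a closed-form
-- comprehension computing element i directly from the start; objective: idiomatic.

-- ===== PORT A =====
def get_contiguous_coordinates (starting_coordinate : Int × Int) (direction : String) (size : Int) : List (Int × Int) :=
  -- coordinate_list = [starting_coordinate]; for idx in range(size - 1): append next
  (PySem.List.pyRange 0 (size - 1) 1).foldl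
    (fun coordinate_list idx =>
      let prev := PySem.List.pyGetD coordinate_list idx ((0 : Int), (0 : Int))
      let new_coordinate :=
        if direction = "right" then (prev.1 + 1, prev.2)
        else if direction = "down" then (prev.1, prev.2 + 1)
        else if direction = "left" then (prev.1 - 1, prev.2)
        else (prev.1, prev.2 - 1)
      coordinate_list ++ [new_coordinate])
    [starting_coordinate]

-- ===== PORT B =====
-- the {"right": (1,0), ...}[direction] lookup of Source B
def pvStepOf (direction : String) : Int × Int :=
  if direction = "right" then (1, 0)
  else if direction = "down" then (0, 1)
  else if direction = "left" then (-1, 0)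
  else (0, -1)

def get_contiguous_coordinates_alt (starting_coordinate : Int × Int) (direction : String) (size : Int) : List (Int × Int) :=
  let d := pvStepOf direction
  (List.range (max 1 size).toNat).map
    (fun i : Nat => (starting_coordinate.1 + (i : Int) * d.1, starting_coordinate.2 + (i : Int) * d.2))

-- ===== PRECONDITION & SPEC =====
-- Pre_ excludes exactly the inputs on which A's `assert direction in {...}` raises AssertionError.
def Pre_get_contiguous_coordinates (starting_coordinate : Int × Int) (direction : String) (size : Int) : Prop :=
  direction = "right" ∨ direction = "down" ∨ direction = "left" ∨ direction = "up"
instance (starting_coordinate : Int × Int) (direction : String) (size : Int) : Decidable (Pre_get_contiguous_coordinates starting_coordinate direction size) := by unfold Pre_get_contiguous_coordinates; infer_instance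

def pvWitness_get_contiguous_coordinates : (Int × Int) × String × Int := ((2, 3), "down", 4)

def Spec_get_contiguous_coordinates (starting_coordinate : Int × Int) (direction : String) (size : Int) (out : List (Int × Int)) : Prop := out = get_contiguous_coordinates_alt starting_coordinate direction size
instance (starting_coordinate : Int × Int) (direction : String) (size : Int) (out : List (Int × Int)) : Decidable (Spec_get_contiguous_coordinates starting_coordinate direction size out) := by unfold Spec_get_contiguous_coordinates; infer_instance

-- ===== CLAIM (what is proved, stated in full; the proofs are below) =====
def Claim_equal_get_contiguous_coordinates : Prop := ∀ (starting_coordinate : Int × Int) (direction : String) (size : Int), Dom_get_contiguous_coordinates starting_coordinate direction size → Pre_get_contiguous_coordinates starting_coordinate direction size → Spec_get_contiguous_coordinates starting_coordinate direction size (get_contiguous_coordinates starting_coordinate direction size)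

-- ===== LEMMAS AND PROOFS =====

-- A's loop, for a fixed step d, unrolled over n iterations equals the closed form.
theorem pv_loop_eq (sc d : Int × Int) (n : Nat) :
    (PySem.List.pyRange 0 (n : Int) 1).foldl
      (fun acc idx =>
        acc ++ [((PySem.List.pyGetD acc idx ((0 : Int), (0 : Int))).1 + d.1,
                 (PySem.List.pyGetD acc idx ((0 : Int), (0 : Int))).2 + d.2)])
      [sc]
    = (List.range (n + 1)).map (fun i : Nat => (sc.1 + (i : Int) * d.1, sc.2 + (i : Int) * d.2)) := by
  induction n with
  | zero => simp [List.range_succ]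
  | succ n ih =>
    have h : (((n : Nat) + 1 : Nat) : Int) = (n : Int) + 1 := by push_cast; ring
    rw [h, PySem.List.pyRange_one_succ_right (by positivity), List.foldl_append, ih]
    simp only [List.foldl_cons, List.foldl_nil]
    rw [show (n : Int) = ((n : Nat) : Int) from rfl, PySem.List.pyGetD_natCast]
    rw [List.getD_eq_getElem?_getD]
    have hlt : n < (List.range (n + 1)).length := by simp
    rw [List.getElem?_map, List.getElem?_range (by omega)]
    simp only [Option.map_some, Option.getD_some]
    rw [show n + 1 + 1 = (n + 1) + 1 from rfl]
    simp [List.range_succ, Prod.ext_iff]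
    constructor <;> ring

theorem get_contiguous_coordinates_eq_loop (sc : Int × Int) (direction : String) (size : Int)
    (d : Int × Int) (hd : pvStepOf direction = d)
    (hstep : ∀ (p : Int × Int),
      (if direction = "right" then (p.1 + 1, p.2)
       else if direction = "down" then (p.1, p.2 + 1)
       else if direction = "left" then (p.1 - 1, p.2)
       else (p.1, p.2 - 1)) = (p.1 + d.1, p.2 + d.2)) :
    get_contiguous_coordinates sc direction size = get_contiguous_coordinates_alt sc direction size := by
  unfold get_contiguous_coordinates get_contiguous_coordinates_alt
  simp only [hd, hstep]
  have hrng : PySem.List.pyRange 0 (size - 1) 1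
      = PySem.List.pyRange 0 (((size - 1).toNat : Nat) : Int) 1 := by
    rw [PySem.List.pyRange_one, PySem.List.pyRange_one]
    congr 2
    omega
  rw [hrng, pv_loop_eq sc d (size - 1).toNat]
  have : (size - 1).toNat + 1 = (max 1 size).toNat := by omega
  rw [this]

-- ===== VERDICT (by name: the statement is the Claim_ definition above) =====
theorem get_contiguous_coordinates_spec : Claim_equal_get_contiguous_coordinates := by
  intro sc direction size _ hpre
  unfold Spec_get_contiguous_coordinates
  rcases hpre with h | h | h | h <;> subst h <;>
    [exact get_contiguous_coordinates_eq_loop _ _ _ (1, 0) rfl (fun p => by simp);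
     exact get_contiguous_coordinates_eq_loop _ _ _ (0, 1) rfl (fun p => by simp);
     exact get_contiguous_coordinates_eq_loop _ _ _ (-1, 0) rfl (fun p => by simp [Int.sub_eq_add_neg]);
     exact get_contiguous_coordinates_eq_loop _ _ _ (0, -1) rfl (fun p => by simp [Int.sub_eq_add_neg])]
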